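-- pv_equiv track=rewrite | github.com/phaniratan1234/Dynamo-cloud | inference.py | detect_task_from_query
-- ===== SOURCE A (Python) =====
-- def detect_task_from_query(query: str) -> str:
--     """
--     Automatically detect the most likely task from the query.
--     This is a simple heuristic-based approach.
--     """
--     query_lower = query.lower()
--
--     # Question answering indicators
--     qa_indicators = ['what', 'how', 'when', 'where', 'why', 'who', '?']
--     if any(indicator in query_lower for indicator in qa_indicators):
--         return 'qa'
--
--     # Sentiment analysis indicators
--     sentiment_indicators = ['feel', 'think', 'opinion', 'review', 'good', 'bad', 'great', 'terrible']
--     if any(indicator in query_lower for indicator in sentiment_indicators):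
--         return 'sentiment'
--
--     # Code generation indicators
--     code_indicators = ['function', 'def', 'class', 'import', 'return', 'print', 'code', 'program']
--     if any(indicator in query_lower for indicator in code_indicators):
--         return 'code_generation'
--
--     # Translation indicators
--     translation_indicators = ['translate', 'spanish', 'french', 'german', 'chinese', 'japanese']
--     if any(indicator in query_lower for indicator in translation_indicators):
--         return 'translation'
--
--     # Summarization indicators (default for longer texts)
--     if len(query.split()) > 50:
--         return 'summarization'
--
--     # Default to sentiment for short text
--     return 'sentiment'
-- ===== SOURCE B (Python) =====
-- # One flat keyword->priority map scanned in a single accumulator pass: instead of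
-- # A's cascade of per-category any() checks with early returns, B computes the
-- # minimum priority rank over all keywords found in the query and indexes a label
-- # list with it; the length/default tail is reached only when no keyword matched.
--
-- KEYWORD_RANK = {
--     'what': 0, 'how': 0, 'when': 0, 'where': 0, 'why': 0, 'who': 0, '?': 0,
--     'feel': 1, 'think': 1, 'opinion': 1, 'review': 1, 'good': 1, 'bad': 1,
--     'great': 1, 'terrible': 1,
--     'function': 2, 'def': 2, 'class': 2, 'import': 2, 'return': 2, 'print': 2,
--     'code': 2, 'program': 2,
--     'translate': 3, 'spanish': 3, 'french': 3, 'german': 3, 'chinese': 3,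
--     'japanese': 3,
-- }
-- LABELS = ['qa', 'sentiment', 'code_generation', 'translation']
--
--
-- def detect_task_from_query(query: str) -> str:
--     query_lower = query.lower()
--     best = len(LABELS)
--     for keyword, rank in KEYWORD_RANK.items():
--         if rank < best and keyword in query_lower:
--             best = rank
--     if best < len(LABELS):
--         return LABELS[best]
--     return 'summarization' if len(query.split()) > 50 else 'sentiment'
-- ===== Notes on version B (the rewrite author's own statement) =====
-- stated objective: alternative
-- what changed: Replaces A's early-return cascade of per-category any() substring checks by a single accumulator pass over one flat keyword-to-priority map that computes the minimum priority rank of any keyword present and indexes a label list, with the length/default tail reached only when no keyword matched.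
import Mathlib
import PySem

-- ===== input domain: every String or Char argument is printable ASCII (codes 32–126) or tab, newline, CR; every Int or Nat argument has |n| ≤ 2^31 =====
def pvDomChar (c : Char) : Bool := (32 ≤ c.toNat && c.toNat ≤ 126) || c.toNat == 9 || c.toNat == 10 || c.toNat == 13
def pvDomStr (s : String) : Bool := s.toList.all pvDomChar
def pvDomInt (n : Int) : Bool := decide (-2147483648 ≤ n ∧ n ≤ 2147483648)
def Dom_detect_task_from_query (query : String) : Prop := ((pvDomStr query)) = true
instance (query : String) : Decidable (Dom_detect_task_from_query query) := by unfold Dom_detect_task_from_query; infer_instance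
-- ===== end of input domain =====

-- B replaces A's early-return cascade of per-category any() checks by one min-rank
-- accumulator pass over a flat keyword->priority map, indexing a label list (alternative decomposition; same cost).


-- ===== PORT A =====
def detect_task_from_query (query : String) : String :=
  let query_lower := PySem.Str.lower query
  if (["what", "how", "when", "where", "why", "who", "?"].any
      (fun indicator => PySem.Str.isIn indicator query_lower)) then "qa"
  else if (["feel", "think", "opinion", "review", "good", "bad", "great", "terrible"].any
      (fun indicator => PySem.Str.isIn indicator query_lower)) then "sentiment"
  else if (["function", "def", "class", "import", "return", "print", "code", "program"].any
      (fun indicator => PySem.Str.isIn indicator query_lower)) then "code_generation"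
  else if (["translate", "spanish", "french", "german", "chinese", "japanese"].any
      (fun indicator => PySem.Str.isIn indicator query_lower)) then "translation"
  else if 50 < (PySem.Str.split₀ query).length then "summarization"
  else "sentiment"

-- ===== PORT B =====
-- the KEYWORD_RANK dict (insertion order) as an association list keyword -> priority rank
def pvKeywordRank : List (String × Nat) :=
  [("what", 0), ("how", 0), ("when", 0), ("where", 0), ("why", 0), ("who", 0), ("?", 0),
   ("feel", 1), ("think", 1), ("opinion", 1), ("review", 1), ("good", 1), ("bad", 1),
   ("great", 1), ("terrible", 1),
   ("function", 2), ("def", 2), ("class", 2), ("import", 2), ("return", 2), ("print", 2),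
   ("code", 2), ("program", 2),
   ("translate", 3), ("spanish", 3), ("french", 3), ("german", 3), ("chinese", 3),
   ("japanese", 3)]

def pvLabels : List String := ["qa", "sentiment", "code_generation", "translation"]

-- the loop body: 'if rank < best and keyword in query_lower: best = rank'
def pvStep (query_lower : String) (best : Nat) (p : String × Nat) : Nat :=
  if p.2 < best ∧ PySem.Str.isIn p.1 query_lower = true then p.2 else best

def detect_task_from_query_alt (query : String) : String :=
  let query_lower := PySem.Str.lower query
  let best := pvKeywordRank.foldl (pvStep query_lower) pvLabels.length
  if best < pvLabels.length then pvLabels.getD best ""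
  else if 50 < (PySem.Str.split₀ query).length then "summarization"
  else "sentiment"

-- ===== PRECONDITION & SPEC =====
def Spec_detect_task_from_query (query : String) (out : String) : Prop := out = detect_task_from_query_alt query
instance (query : String) (out : String) : Decidable (Spec_detect_task_from_query query out) := by unfold Spec_detect_task_from_query; infer_instance

-- ===== CLAIM (what is proved, stated in full; the proofs are below) =====
def Claim_equal_detect_task_from_query : Prop := ∀ (query : String), Dom_detect_task_from_query query → Spec_detect_task_from_query query (detect_task_from_query query)

-- ===== LEMMAS AND PROOFS =====

-- folding a block of keywords that all carry the same rank r lowers the accumulator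
-- to r exactly when r < b and some keyword of the block occurs in the query
theorem foldl_rank_const (ql : String) (r : Nat) (kws : List String) (b : Nat) :
    ((kws.map (fun k => (k, r))).foldl (pvStep ql) b)
      = if r < b ∧ (kws.any (fun k => PySem.Str.isIn k ql)) = true then r else b := by
  induction kws generalizing b with
  | nil => simp
  | cons k ks ih =>
    rw [List.map_cons, List.foldl_cons]
    simp only [pvStep, List.any_cons, Bool.or_eq_true]
    rw [ih]
    generalize PySem.Str.isIn k ql = x
    generalize (ks.any fun k => PySem.Str.isIn k ql) = y
    cases x <;> cases y <;> simp <;> split_ifs <;> omega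

-- the flat keyword->rank list is the four rank blocks in order
theorem pvKeywordRank_eq :
    pvKeywordRank =
      (["what", "how", "when", "where", "why", "who", "?"].map (fun k => (k, 0)))
      ++ (["feel", "think", "opinion", "review", "good", "bad", "great", "terrible"].map (fun k => (k, 1)))
      ++ (["function", "def", "class", "import", "return", "print", "code", "program"].map (fun k => (k, 2)))
      ++ (["translate", "spanish", "french", "german", "chinese", "japanese"].map (fun k => (k, 3))) := by
  rfl

-- ===== VERDICT (by name: the statement is the Claim_ definition above) =====
theorem detect_task_from_query_spec : Claim_equal_detect_task_from_query := by
  intro query _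
  unfold Spec_detect_task_from_query detect_task_from_query detect_task_from_query_alt
  rw [pvKeywordRank_eq]
  simp only [List.foldl_append, foldl_rank_const, pvLabels, List.length_cons, List.length_nil]
  generalize (["what", "how", "when", "where", "why", "who", "?"].any
      (fun k => PySem.Str.isIn k (PySem.Str.lower query))) = a0
  generalize (["feel", "think", "opinion", "review", "good", "bad", "great", "terrible"].any
      (fun k => PySem.Str.isIn k (PySem.Str.lower query))) = a1
  generalize (["function", "def", "class", "import", "return", "print", "code", "program"].any
      (fun k => PySem.Str.isIn k (PySem.Str.lower query))) = a2
  generalize (["translate", "spanish", "french", "german", "chinese", "japanese"].any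
      (fun k => PySem.Str.isIn k (PySem.Str.lower query))) = a3
  cases a0 <;> cases a1 <;> cases a2 <;> cases a3 <;> simp [List.getD]
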